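-- pv_equiv track=rewrite | github.com/asa-jg/ML | Graphical Models CW/Vlads.py | countVerticalAlignments
-- ===== SOURCE A (Python) =====
-- def countVerticalAlignments(s, n=10):
--     cnt = 0
--     for i in range(n - 1):
--         bitI = (s >> i) & 1
--         bitIp1 = (s >> (i + 1)) & 1
--         if bitI == bitIp1:
--             cnt += 1
--     return cnt
-- ===== SOURCE B (Python) =====
-- def countVerticalAlignments(s, n=10):
--     if n < 1:
--         return 0
--     x = s ^ (s >> 1)  # nonnegative: bit i is set iff bits i and i+1 of s differ
--     if n - 1 >= x.bit_length():
--         d = x.bit_count()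
--     else:
--         d = (x & ((1 << (n - 1)) - 1)).bit_count()
--     return (n - 1) - d
-- ===== Notes on version B (the rewrite author's own statement) =====
-- stated objective: faster
-- what changed: Replaces the bit-by-bit loop with a closed form: bit i of s^(s>>1) is set iff bits i and i+1 of s differ, so the answer is (n-1) minus a popcount of that value (masked to the low n-1 bits only when the mask actually clears something).
import Mathlib
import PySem

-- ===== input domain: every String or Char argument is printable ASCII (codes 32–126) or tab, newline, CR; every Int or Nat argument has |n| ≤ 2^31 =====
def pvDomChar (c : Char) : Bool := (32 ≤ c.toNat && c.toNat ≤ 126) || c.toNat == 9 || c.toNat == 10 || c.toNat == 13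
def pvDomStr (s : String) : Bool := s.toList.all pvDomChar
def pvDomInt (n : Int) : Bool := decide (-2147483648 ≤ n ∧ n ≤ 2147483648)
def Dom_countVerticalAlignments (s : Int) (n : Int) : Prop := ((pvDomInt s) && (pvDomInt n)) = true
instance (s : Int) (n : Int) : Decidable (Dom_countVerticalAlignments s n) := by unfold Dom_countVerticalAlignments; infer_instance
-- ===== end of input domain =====

-- B replaces A's bit-by-bit loop with the closed form (n-1) - popcount((s ^ (s >> 1)) & ((1 << (n-1)) - 1)); equal bits ↔ zero bit of the xor.

-- ===== PORT A =====
-- Int.land / `>>>` on Int are two's-complement and arithmetic shift, exactly Python's `&` and `>>` (shift amounts here are ≥ 0).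
def countVerticalAlignments (s : Int) (n : Int) : Int :=
  (PySem.List.pyRange 0 (n - 1) 1).foldl (fun cnt i =>
    let bitI := Int.land (s >>> i) 1
    let bitIp1 := Int.land (s >>> (i + 1)) 1
    if bitI = bitIp1 then cnt + 1 else cnt) 0

-- ===== PORT B =====
-- popcount: port of Python's int.bit_count() on a nonnegative value.
def bitCount (x : Nat) : Nat :=
  if x = 0 then 0 else x % 2 + bitCount (x / 2)
decreasing_by exact Nat.div_lt_self (Nat.pos_of_ne_zero (by assumption)) one_lt_two

-- bit length: port of Python's int.bit_length() on a nonnegative value.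
def bitLength (x : Nat) : Nat :=
  if x = 0 then 0 else bitLength (x / 2) + 1
decreasing_by exact Nat.div_lt_self (Nat.pos_of_ne_zero (by assumption)) one_lt_two

-- Int.xor / Int.land / `<<<` `>>>` on Int are two's-complement, exactly Python's `^` `&` `<<` `>>`;
-- x = s ^ (s >> 1) is ≥ 0 (s and s >> 1 have the same sign), so x.toNat is exact and
-- bit_count / bit_length are bitCount / bitLength.
def countVerticalAlignments_alt (s : Int) (n : Int) : Int :=
  if n < 1 then 0
  else
    let x := Int.xor s (s >>> (1 : Int))
    let d := if (bitLength x.toNat : Int) ≤ n - 1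
             then bitCount x.toNat
             else bitCount (Int.land x ((1 <<< (n - 1)) - 1)).toNat
    (n - 1) - (d : Int)

-- ===== PRECONDITION & SPEC =====
def Spec_countVerticalAlignments (s : Int) (n : Int) (out : Int) : Prop := out = countVerticalAlignments_alt s n
instance (s : Int) (n : Int) (out : Int) : Decidable (Spec_countVerticalAlignments s n out) := by unfold Spec_countVerticalAlignments; infer_instance

-- ===== CLAIM (what is proved, stated in full; the proofs are below) =====
def Claim_equal_countVerticalAlignments : Prop := ∀ (s : Int) (n : Int), Dom_countVerticalAlignments s n → Spec_countVerticalAlignments s n (countVerticalAlignments s n)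

-- ===== LEMMAS AND PROOFS =====

-- Python's x & 1 extracts bit 0.
theorem pv_ldiff_one (m : Nat) : Nat.ldiff 1 m = if m.testBit 0 then 0 else 1 := by
  apply Nat.eq_of_testBit_eq
  intro j
  rw [Nat.testBit_ldiff]
  rcases Nat.eq_zero_or_pos j with rfl | hj
  · cases h : m.testBit 0 <;> simp [h]
  · have h1 : Nat.testBit 1 j = false := by
      rcases j with _ | j
      · omega
      · simp [Nat.testBit_succ]
    cases h : m.testBit 0 <;> simp [h1]

theorem pv_land_one (x : Int) : Int.land x 1 = if x.testBit 0 then 1 else 0 := by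
  cases x with
  | ofNat m =>
      have h : Int.land (Int.ofNat m) 1 = Int.ofNat (m &&& 1) := rfl
      rw [h, Nat.and_one_is_mod]
      have ht : (Int.ofNat m).testBit 0 = decide (m % 2 = 1) := by
        simp [Int.testBit, Nat.testBit_zero]
      rw [ht]
      rcases Nat.mod_two_eq_zero_or_one m with h2 | h2 <;> simp [h2]
  | negSucc m =>
      have h : Int.land (Int.negSucc m) 1 = Int.ofNat (Nat.ldiff 1 m) := rfl
      rw [h, pv_ldiff_one]
      have ht : (Int.negSucc m).testBit 0 = !m.testBit 0 := rfl
      rw [ht]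
      cases h2 : m.testBit 0 <;> simp

-- testBit through an arithmetic right shift by a natural amount.
theorem pv_testBit_shift (s : Int) (k j : Nat) :
    (s >>> (k : Int)).testBit j = s.testBit (k + j) := by
  cases s with
  | ofNat m =>
      rw [show Int.ofNat m = (m : Int) from rfl, Int.shiftRight_natCast]
      simp [Int.testBit, Nat.testBit_shiftRight]
  | negSucc m =>
      rw [Int.shiftRight_negSucc]
      simp [Int.testBit, Nat.testBit_shiftRight]

theorem pv_land_zero (z : Int) : Int.land z 0 = 0 := by
  cases z with
  | ofNat m =>
      show Int.ofNat (m &&& 0) = 0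
      simp
  | negSucc m =>
      have h : Int.land (Int.negSucc m) 0 = Int.ofNat (Nat.ldiff 0 m) := rfl
      have h2 : Nat.ldiff 0 m = 0 := by
        apply Nat.eq_of_testBit_eq
        intro j
        simp [Nat.testBit_ldiff]
      simp [h, h2]

-- land with a nonnegative mask yields a natural number.
theorem pv_land_ofNat (z : Int) (k : Nat) :
    ∃ W : Nat, Int.land z (Int.ofNat k) = Int.ofNat W := by
  cases z with
  | ofNat m => exact ⟨Nat.land m k, rfl⟩
  | negSucc m => exact ⟨Nat.ldiff k m, rfl⟩

theorem pv_bitCount_bit (W : Nat) (b : Bool) :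
    bitCount (2 * W + cond b 1 0) = cond b 1 0 + bitCount W := by
  cases b
  · simp only [cond]
    rcases Nat.eq_zero_or_pos W with rfl | hW
    · simp
    · rw [bitCount]
      have h0 : ¬ (2 * W + 0 = 0) := by omega
      have h1 : (2 * W + 0) % 2 = 0 := by omega
      have h2 : (2 * W + 0) / 2 = W := by omega
      simp [h0, h1, h2]
      intro h
      exact absurd h (by omega)
  · simp only [cond]
    rw [bitCount]
    have h0 : ¬ (2 * W + 1 = 0) := by omega
    have h1 : (2 * W + 1) % 2 = 1 := by omega
    have h2 : (2 * W + 1) / 2 = W := by omega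
    simp [h0, h1, h2]

-- popcount of z masked to the low m bits counts the set bits among the first m.
theorem pv_maskCount (m : Nat) : ∀ (z : Int),
    bitCount (Int.land z ((2 ^ m - 1 : Nat) : Int)).toNat
      = (List.range m).countP (fun i => z.testBit i) := by
  induction m with
  | zero =>
      intro z
      simp only [pow_zero, Nat.sub_self, Nat.cast_zero, pv_land_zero]
      rw [bitCount]
      simp
  | succ m ih =>
      intro z
      induction z using Int.bitCasesOn with
      | _ b w =>
        have hmask : ((2 ^ (m + 1) - 1 : Nat) : Int) = Int.bit true ((2 ^ m - 1 : Nat) : Int) := by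
          rw [Int.bit_val]
          have h1 : 1 ≤ 2 ^ m := Nat.one_le_two_pow
          have h2 : (((2 : Nat) ^ (m + 1) : Nat) : Int) = 2 * ((2 ^ m : Nat) : Int) := by
            push_cast
            ring
          rw [Nat.cast_sub (Nat.one_le_two_pow), Nat.cast_sub h1, h2]
          simp only [cond]
          ring
        rw [hmask, Int.land_bit]
        obtain ⟨W, hW⟩ := pv_land_ofNat w (2 ^ m - 1)
        have hWc : Int.land w ((2 ^ m - 1 : Nat) : Int) = Int.ofNat W := hW
        rw [Bool.and_true, hWc]
        have hbit : Int.bit b (Int.ofNat W) = Int.ofNat (2 * W + cond b 1 0) := by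
          rw [Int.bit_val]
          cases b <;> simp <;> push_cast <;> ring
        rw [hbit]
        have htn : (Int.ofNat (2 * W + cond b 1 0)).toNat = 2 * W + cond b 1 0 := rfl
        rw [htn, pv_bitCount_bit]
        have hcount : bitCount W = (List.range m).countP (fun i => w.testBit i) := by
          have := ih w
          rw [hWc] at this
          exact this
        rw [hcount, List.range_succ_eq_map]
        rw [List.countP_cons, List.countP_map]
        have hsucc : ((List.range m).countP ((fun i => (Int.bit b w).testBit i) ∘ Nat.succ))
            = (List.range m).countP (fun i => w.testBit i) := by
          apply List.countP_congr
          intro i _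
          simp [Function.comp, Int.testBit_bit_succ]
        rw [hsucc]
        cases b <;> simp [Int.testBit_bit_zero] <;> omega

theorem pv_foldl_count {a : Type} (P : a -> Bool) (l : List a) : forall (c : Int),
    l.foldl (fun cnt i => if P i then cnt + 1 else cnt) c
      = c + ((l.countP P : Nat) : Int) := by
  induction l with
  | nil => intro c; simp
  | cons x l ih =>
      intro c
      rw [List.foldl_cons, List.countP_cons, ih]
      cases h : P x <;> simp [h] <;> push_cast <;> ring

-- A counts the positions below n-1 whose bit equals the next bit.
theorem pv_A_char (s : Int) (n : Int) :
    countVerticalAlignments s n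
      = (((List.range (n - 1).toNat).countP
            (fun k => s.testBit k == s.testBit (k + 1)) : Nat) : Int) := by
  unfold countVerticalAlignments
  rw [PySem.List.pyRange_one, List.foldl_map]
  have hbody : (fun (cnt : Int) (k : Nat) =>
        (fun cnt i =>
          let bitI := Int.land (s >>> i) 1
          let bitIp1 := Int.land (s >>> (i + 1)) 1
          if bitI = bitIp1 then cnt + 1 else cnt) cnt ((0 : Int) + (k : Int)))
      = (fun (cnt : Int) (k : Nat) =>
          if s.testBit k == s.testBit (k + 1) then cnt + 1 else cnt) := by
    funext cnt k
    simp only [zero_add]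
    have e1 : Int.land (s >>> (k : Int)) 1 = if s.testBit k then 1 else 0 := by
      rw [pv_land_one, pv_testBit_shift, Nat.add_zero]
    have e15 : ((k : Int) + 1) = ((k + 1 : Nat) : Int) := by push_cast; ring
    have e2 : Int.land (s >>> ((k : Int) + 1)) 1 = if s.testBit (k + 1) then 1 else 0 := by
      rw [e15, pv_land_one, pv_testBit_shift]
    simp only [e1, e2]
    cases h1 : s.testBit k <;> cases h2 : s.testBit (k + 1) <;> simp
  rw [hbody, pv_foldl_count]
  simp

-- s and s >> 1 have the same sign, so their xor is a natural number.
theorem pv_xor_ofNat (s : Int) :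
    ∃ X : Nat, Int.xor s (s >>> (1 : Int)) = Int.ofNat X := by
  cases s with
  | ofNat m =>
      rw [show Int.ofNat m = (m : Int) from rfl,
        show ((1 : Int)) = ((1 : Nat) : Int) from rfl, Int.shiftRight_natCast]
      exact ⟨Nat.xor m (m >>> 1), rfl⟩
  | negSucc m =>
      rw [show ((1 : Int)) = ((1 : Nat) : Int) from rfl, Int.shiftRight_negSucc]
      exact ⟨Nat.xor m (m >>> 1), rfl⟩

theorem pv_lt_two_pow_bitLength : ∀ X : Nat, X < 2 ^ bitLength X := by
  intro X
  induction X using Nat.strong_induction_on with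
  | _ X ih =>
    rw [bitLength]
    rcases Nat.eq_zero_or_pos X with rfl | hX
    · simp
    · have hne : ¬ (X = 0) := by omega
      simp only [hne, if_false]
      have hlt : X / 2 < X := Nat.div_lt_self hX one_lt_two
      have := ih (X / 2) hlt
      have h2 : (2 : Nat) ^ (bitLength (X / 2) + 1) = 2 * 2 ^ bitLength (X / 2) := by ring
      omega

-- popcount of a natural already below 2^m counts its set bits among the first m.
theorem pv_bitCount_eq_countP (X m : Nat) (hX : X < 2 ^ m) :
    bitCount X = (List.range m).countP (fun i => (Int.ofNat X).testBit i) := by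
  have hland : Int.land (Int.ofNat X) ((2 ^ m - 1 : Nat) : Int) = Int.ofNat X := by
    have h : Int.land (Int.ofNat X) (Int.ofNat (2 ^ m - 1)) = Int.ofNat (X &&& (2 ^ m - 1)) := rfl
    rw [show ((2 ^ m - 1 : Nat) : Int) = Int.ofNat (2 ^ m - 1) from rfl, h,
      Nat.and_two_pow_sub_one_eq_mod, Nat.mod_eq_of_lt hX]
  have := pv_maskCount m (Int.ofNat X)
  rw [hland] at this
  exact this

-- the xor bit k is set exactly when bits k and k+1 of s differ.
theorem pv_xor_testBit (s : Int) (k : Nat) :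
    (Int.xor s (s >>> (1 : Int))).testBit k = !(s.testBit k == s.testBit (k + 1)) := by
  have hsh : (s >>> (1 : Int)).testBit k = s.testBit (k + 1) := by
    have h := pv_testBit_shift s 1 k
    rw [Nat.cast_one] at h
    rw [h, Nat.add_comm]
  rw [Int.testBit_lxor, hsh]
  cases h1 : s.testBit k <;> cases h2 : s.testBit (k + 1) <;> simp

-- B subtracts from n-1 the number of positions below n-1 whose bit differs from the next bit.
theorem pv_B_char (s : Int) (n : Int) (hn : ¬ n < 1) :
    countVerticalAlignments_alt s n
      = (n - 1) - (((List.range (n - 1).toNat).countP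
            (fun k => !(s.testBit k == s.testBit (k + 1))) : Nat) : Int) := by
  unfold countVerticalAlignments_alt
  rw [if_neg hn]
  obtain ⟨X, hX⟩ := pv_xor_ofNat s
  have htn : (Int.xor s (s >>> (1 : Int))).toNat = X := by rw [hX]; rfl
  have hcnt : ∀ m : Nat, (List.range m).countP (fun i => (Int.ofNat X).testBit i)
      = (List.range m).countP (fun k => !(s.testBit k == s.testBit (k + 1))) := by
    intro m
    apply List.countP_congr
    intro k _
    rw [← hX, pv_xor_testBit]
  simp only [htn]
  by_cases hbl : ((bitLength X : Nat) : Int) ≤ n - 1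
  · rw [if_pos hbl]
    have hXlt : X < 2 ^ (n - 1).toNat := by
      have h1 := pv_lt_two_pow_bitLength X
      have h2 : bitLength X ≤ (n - 1).toNat := by omega
      have h3 : (2 : Nat) ^ bitLength X ≤ 2 ^ (n - 1).toNat :=
        Nat.pow_le_pow_right (by omega) h2
      omega
    rw [pv_bitCount_eq_countP X (n - 1).toNat hXlt, hcnt]
  · rw [if_neg hbl]
    have hm : (n - 1) = (((n - 1).toNat : Nat) : Int) := by omega
    have hmask : ((1 : Int) <<< (n - 1)) - 1 = ((2 ^ (n - 1).toNat - 1 : Nat) : Int) := by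
      rw [hm, Int.one_shiftLeft]
      have h1 : 1 ≤ 2 ^ (n - 1).toNat := Nat.one_le_two_pow
      rw [Int.toNat_natCast, Nat.cast_sub h1]
      simp
    rw [hX, hmask, pv_maskCount, hcnt]

-- ===== VERDICT (by name: the statement is the Claim_ definition above) =====
theorem countVerticalAlignments_spec : Claim_equal_countVerticalAlignments := by
  intro s n _
  unfold Spec_countVerticalAlignments
  rw [pv_A_char]
  by_cases hn : n < 1
  · have h0 : (n - 1).toNat = 0 := by omega
    unfold countVerticalAlignments_alt
    rw [if_pos hn, h0]
    simp
  · rw [pv_B_char s n hn]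
    have hlen : (List.range (n - 1).toNat).length = (n - 1).toNat := List.length_range
    have hsplit := List.length_eq_countP_add_countP
      (p := fun k => s.testBit k == s.testBit (k + 1)) (l := List.range (n - 1).toNat)
    have hconv : (List.range (n - 1).toNat).countP
          (fun a => decide ¬((fun k => s.testBit k == s.testBit (k + 1)) a = true))
        = (List.range (n - 1).toNat).countP
          (fun k => !(s.testBit k == s.testBit (k + 1))) := by
      apply List.countP_congr
      intro k _
      cases h : (s.testBit k == s.testBit (k + 1)) <;> simp [h]
    rw [hconv] at hsplit
    have hcast : ((n - 1).toNat : Int) = n - 1 := by omega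
    omega
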